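-- pv_equiv track=rewrite | github.com/Soma-Sasaki/python | algorithm/party_solution2.py | chooseTime
-- ===== SOURCE A (Python) =====
-- def chooseTime(times):
--     rcount = 0
--     max_count, time = 0, 0
--     for t1 in times:
--         for t2 in times:
--             if (t2[0] <= t1[0]) and (t2[1] > t1[0]):
--                 rcount += 1
--         if (rcount > max_count):
--             max_count = rcount
--             time = t1[0]
--         rcount = 0
--     return max_count, time
-- ===== SOURCE B (Python) =====
-- def chooseTime(times):
--     # sort the starts and ends of the proper intervals once, then answer each
--     # candidate start with two binary searches: coverage(x) = #starts<=x - #ends<=x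
--     starts = sorted(s for s, e in times if s < e)
--     ends = sorted(e for s, e in times if s < e)
--
--     def bisect_right(a, x):
--         lo, hi = 0, len(a)
--         while lo < hi:
--             mid = (lo + hi) // 2
--             if x < a[mid]:
--                 hi = mid
--             else:
--                 lo = mid + 1
--         return lo
--
--     max_count, time = 0, 0
--     for s, _ in times:
--         c = bisect_right(starts, s) - bisect_right(ends, s)
--         if c > max_count:
--             max_count, time = c, s
--     return max_count, time
-- ===== Notes on version B (the rewrite author's own statement) =====
-- stated objective: faster
-- what changed: Replaced the all-pairs double loop by sorting the starts and ends of the proper intervals once and answering each candidate start with two binary searches (coverage(x) = #starts<=x - #ends<=x).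
import Mathlib
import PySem

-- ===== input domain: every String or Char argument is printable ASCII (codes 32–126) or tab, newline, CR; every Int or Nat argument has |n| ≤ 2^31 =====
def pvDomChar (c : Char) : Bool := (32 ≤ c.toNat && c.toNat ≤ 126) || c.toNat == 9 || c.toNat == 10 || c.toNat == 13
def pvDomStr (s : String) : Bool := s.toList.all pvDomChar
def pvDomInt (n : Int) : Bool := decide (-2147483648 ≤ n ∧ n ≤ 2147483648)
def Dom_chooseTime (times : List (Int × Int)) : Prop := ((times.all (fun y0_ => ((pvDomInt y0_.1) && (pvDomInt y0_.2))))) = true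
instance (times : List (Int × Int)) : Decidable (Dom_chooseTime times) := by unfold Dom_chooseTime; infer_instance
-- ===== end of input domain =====

-- B replaces A's quadratic all-pairs count by sorting starts/ends once and answering each
-- candidate start with two binary searches (objective: faster, O(n^2) -> O(n log n)).


-- ===== PORT A =====
def chooseTime (times : List (Int × Int)) : Int × Int :=
  times.foldl (fun (st : Int × Int) t1 =>
    let rcount : Int := times.foldl (fun rc t2 =>
      if t2.1 ≤ t1.1 ∧ t2.2 > t1.1 then rc + 1 else rc) 0
    if rcount > st.1 then (rcount, t1.1) else st) (0, 0)

-- ===== PORT B =====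
-- Source B's hand-written bisect_right is, loop for loop (while lo < hi; mid = (lo+hi)//2;
-- if x < a[mid] then hi := mid else lo := mid+1; return lo), PySem.List.bisectRight.
def chooseTime_alt (times : List (Int × Int)) : Int × Int :=
  let starts := PySem.List.sorted ((times.filter (fun p => p.1 < p.2)).map (fun p => p.1)) (fun x => x) false
  let ends := PySem.List.sorted ((times.filter (fun p => p.1 < p.2)).map (fun p => p.2)) (fun x => x) false
  times.foldl (fun (st : Int × Int) t =>
    let c : Int := (PySem.List.bisectRight starts t.1 : Int) - (PySem.List.bisectRight ends t.1 : Int)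
    if c > st.1 then (c, t.1) else st) (0, 0)

-- ===== PRECONDITION & SPEC =====
def Spec_chooseTime (times : List (Int × Int)) (out : Int × Int) : Prop := out = chooseTime_alt times
instance (times : List (Int × Int)) (out : Int × Int) : Decidable (Spec_chooseTime times out) := by unfold Spec_chooseTime; infer_instance

-- ===== CLAIM (what is proved, stated in full; the proofs are below) =====
def Claim_equal_chooseTime : Prop := ∀ (times : List (Int × Int)), Dom_chooseTime times → Spec_chooseTime times (chooseTime times)

-- ===== LEMMAS AND PROOFS =====

-- A sorted list whose first r elements are ≤ x and the rest are > x has exactly r elements ≤ x.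
lemma countP_eq_of_cut (a : List Int) (x : Int) (r : Nat) (hr : r ≤ a.length)
    (h1 : ∀ j (hj : j < a.length), j < r → a[j] ≤ x)
    (h2 : ∀ j (hj : j < a.length), r ≤ j → x < a[j]) :
    a.countP (fun y => decide (y ≤ x)) = r := by
  have hsplit : a = a.take r ++ a.drop r := (List.take_append_drop r a).symm
  rw [hsplit, List.countP_append]
  have htake : (a.take r).countP (fun y => decide (y ≤ x)) = r := by
    rw [List.countP_eq_length.2, List.length_take, Nat.min_eq_left hr]
    intro y hy
    obtain ⟨j, hj, hget⟩ := List.mem_take_iff_getElem.mp hy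
    simp only [decide_eq_true_eq]
    rw [← hget]
    exact h1 j (by omega) (by omega)
  have hdrop : (a.drop r).countP (fun y => decide (y ≤ x)) = 0 := by
    rw [List.countP_eq_zero]
    intro y hy
    obtain ⟨j, hj, hget⟩ := List.mem_iff_getElem.mp hy
    rw [List.getElem_drop] at hget
    simp only [decide_eq_true_eq]
    rw [List.length_drop] at hj
    have := h2 (r + j) (by omega) (by omega)
    rw [hget] at this; omega
  omega

-- bisect_right on a sorted list counts the elements ≤ x.
lemma bisectRight_eq_countP (a : List Int) (x : Int)
    (hs : a.Pairwise (fun p q => p ≤ q)) :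
    PySem.List.bisectRight a x = a.countP (fun y => decide (y ≤ x)) := by
  obtain ⟨hle, h1, h2⟩ := PySem.List.bisectRight_spec a x hs
  exact (countP_eq_of_cut a x _ hle h1 h2).symm

-- splitting the proper intervals with start ≤ x by whether the end is ≤ x
lemma countP_split (times : List (Int × Int)) (x : Int) :
    times.countP (fun t => decide (t.1 < t.2) && decide (t.1 ≤ x)) =
      times.countP (fun t => decide (t.1 < t.2) && decide (t.2 ≤ x)) +
      times.countP (fun t => decide (t.1 ≤ x) && decide (x < t.2)) := by
  induction times with
  | nil => simp
  | cons t ts ih =>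
    simp only [List.countP_cons]
    rcases t with ⟨s, e⟩
    by_cases h1 : s < e <;> by_cases h2 : s ≤ x <;> by_cases h3 : e ≤ x <;>
      simp [h1, h2, h3, show x < e ↔ ¬ e ≤ x by omega] <;> omega

-- A's inner loop, as a count
lemma innerA_eq_countP (times : List (Int × Int)) (x : Int) :
    (times.foldl (fun rc t2 =>
      if t2.1 ≤ x ∧ t2.2 > x then rc + 1 else rc) (0 : Int)) =
    (times.countP (fun t => decide (t.1 ≤ x ∧ t.2 > x)) : Int) := by
  simpa using PySem.List.foldl_ite_add_one (fun t : Int × Int => t.1 ≤ x ∧ t.2 > x) times 0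

-- B's per-point coverage equals A's inner count
lemma coverage_eq (times : List (Int × Int)) (x : Int) :
    ((PySem.List.bisectRight
        (PySem.List.sorted ((times.filter (fun p => p.1 < p.2)).map (fun p => p.1)) (fun y => y) false) x : Nat) : Int) -
    ((PySem.List.bisectRight
        (PySem.List.sorted ((times.filter (fun p => p.1 < p.2)).map (fun p => p.2)) (fun y => y) false) x : Nat) : Int) =
    (times.countP (fun t => decide (t.1 ≤ x ∧ t.2 > x)) : Int) := by
  set f := times.filter (fun p : Int × Int => p.1 < p.2) with hf
  have hS : PySem.List.bisectRight (PySem.List.sorted (f.map (fun p => p.1)) (fun y => y) false) x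
      = times.countP (fun t => decide (t.1 < t.2) && decide (t.1 ≤ x)) := by
    rw [bisectRight_eq_countP _ x (by simpa using PySem.List.sorted_pairwise (f.map (fun p => p.1)) (fun y => y)),
      (PySem.List.sorted_perm (f.map (fun p => p.1)) (fun y => y) false).countP_eq,
      List.countP_map, hf, List.countP_filter]
    exact List.countP_congr (fun t _ => by simp [Function.comp, Bool.and_comm])
  have hE : PySem.List.bisectRight (PySem.List.sorted (f.map (fun p => p.2)) (fun y => y) false) x
      = times.countP (fun t => decide (t.1 < t.2) && decide (t.2 ≤ x)) := by
    rw [bisectRight_eq_countP _ x (by simpa using PySem.List.sorted_pairwise (f.map (fun p => p.2)) (fun y => y)),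
      (PySem.List.sorted_perm (f.map (fun p => p.2)) (fun y => y) false).countP_eq,
      List.countP_map, hf, List.countP_filter]
    exact List.countP_congr (fun t _ => by simp [Function.comp, Bool.and_comm])
  rw [hS, hE]
  have hcong : times.countP (fun t => decide (t.1 ≤ x ∧ t.2 > x))
      = times.countP (fun t => decide (t.1 ≤ x) && decide (x < t.2)) :=
    List.countP_congr (fun t _ => by simp [gt_iff_lt])
  rw [hcong]
  have := countP_split times x
  omega

-- ===== VERDICT (by name: the statement is the Claim_ definition above) =====
theorem chooseTime_spec : Claim_equal_chooseTime := by
  intro times _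
  unfold Spec_chooseTime chooseTime chooseTime_alt
  congr 1
  funext st t
  simp only [innerA_eq_countP times t.1, ← coverage_eq times t.1]
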